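-- pv_equiv track=rewrite | github.com/LoucasMaillet/school | college/projects/1 - morse code encryption/code_morse.py | decoder_2
-- ===== SOURCE A (Python) =====
-- from typing import Iterable
--
-- def decoder_2(sequence: str, alphabet: Iterable, codage: Iterable) -> str:
--     """
--
--     Description
--     ----------
--     Unoptimized, call .index() for each buffer of sequence and use try/except instead of test.
--     Decode morse sequence to strict uppercase alphabetic word.
--     Handle transcription errors with '_'.
--
--     Parameters
--     ----------
--     sequence : STRING
--         Morse sequence to decode.
--     alphabet : ITERABLE
--         List of strict uppercase alphabetic characters.
--     codage : ITERABLE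
--         List of morse characters corresponding to alphabet.
--
--     Returns
--     -------
--     res : STRING
--         Sequence decoded.
--
--     """
--
--     res = buffer = ""
--     for c in sequence:
--         buffer += c
--         if c == "/":
--             try:
--                 res += alphabet[codage.index(buffer)]
--             except ValueError:
--                 res += "_"
--             buffer = ""
--
--     return res
-- ===== SOURCE B (Python) =====
-- def decoder_2(sequence: str, alphabet, codage) -> str:
--
--     # tokens produced by str.split instead of scanning character by character
--     # with a buffer and calling codage.index() per token.
--     table = {}
--     for i, code in enumerate(codage):
--         table.setdefault(code, i)
--     parts = sequence.split('/')
--     out = []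
--     for seg in parts[:-1]:          # the trailing fragment is never decoded by the task
--         key = seg + '/'
--         if key in table:
--             out.append(alphabet[table[key]])   # IndexError propagates, as in A
--         else:
--             out.append('_')
--     return ''.join(out)
-- ===== Notes on version B (the rewrite author's own statement) =====
-- stated objective: idiomatic
-- what changed: B builds a code->first-index dict once (enumerate+setdefault) and decodes whole tokens from sequence.split('/') instead of A's per-character buffer scan with a codage.index() call per token.
import Mathlib
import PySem

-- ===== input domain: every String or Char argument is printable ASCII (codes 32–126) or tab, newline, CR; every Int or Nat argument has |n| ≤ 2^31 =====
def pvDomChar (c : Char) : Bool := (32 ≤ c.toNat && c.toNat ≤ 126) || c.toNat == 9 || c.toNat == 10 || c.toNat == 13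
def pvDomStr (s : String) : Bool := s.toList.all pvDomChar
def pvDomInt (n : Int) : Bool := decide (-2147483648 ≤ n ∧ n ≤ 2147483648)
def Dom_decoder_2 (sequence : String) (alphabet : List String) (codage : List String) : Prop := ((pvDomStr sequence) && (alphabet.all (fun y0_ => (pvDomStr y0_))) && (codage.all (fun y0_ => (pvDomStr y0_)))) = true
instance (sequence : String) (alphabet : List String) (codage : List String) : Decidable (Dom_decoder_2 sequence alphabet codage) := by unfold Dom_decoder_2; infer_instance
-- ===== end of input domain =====

-- B replaces A's per-character buffer scan + codage.index() per token by a dict built once and str.split over whole tokens.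
-- ===== PORT A =====
-- A's loop: state (buffer, res); on '/', alphabet[codage.index(buffer)] with ValueError -> '_'.
-- alphabet.getD i "" totalizes Python's alphabet[i]; Pre_ excludes the inputs where that is an IndexError.
def pvLoopA (alphabet codage : List String) : List Char → List Char → List Char → List Char
  | [], _buf, res => res
  | c :: cs, buf, res =>
    if c = '/' then
      pvLoopA alphabet codage cs []
        (res ++ (match PySem.List.index? codage (String.ofList (buf ++ [c])) with
                 | some i => (alphabet.getD i "").toList
                 | none => ['_']))
    else pvLoopA alphabet codage cs (buf ++ [c]) res

def decoder_2 (sequence : String) (alphabet : List String) (codage : List String) : String :=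
  String.ofList (pvLoopA alphabet codage sequence.toList [] [])

-- ===== PORT B =====
-- hand-written port of sequence.split('/') (Python keeps empty pieces; result is never empty)
def pvSplit : List Char → List (List Char)
  | [] => [[]]
  | c :: cs =>
    if c = '/' then [] :: pvSplit cs
    else match pvSplit cs with
      | p :: ps => (c :: p) :: ps
      | [] => [[c]]   -- unreachable: pvSplit never returns []

-- table = {}; for i, code in enumerate(codage): table.setdefault(code, i)
def pvTable (codage : List String) : PySem.Dict String Int :=
  (PySem.List.enumerate codage 0).foldl (fun d p => d.setdefault p.2 p.1) PySem.Dict.empty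

-- parts[:-1] is dropLast (parts is nonempty); 'key in table' + table[key] collapse into one get?.
-- pyGetD … "" totalizes Python's alphabet[table[key]]; Pre_ excludes the IndexError inputs.
def decoder_2_alt (sequence : String) (alphabet : List String) (codage : List String) : String :=
  let table := pvTable codage
  let parts := pvSplit sequence.toList
  String.ofList ((parts.dropLast.map (fun seg =>
      match table.get? (String.ofList (seg ++ ['/'])) with
      | some i => (PySem.List.pyGetD alphabet i "").toList
      | none => ['_'])).flatten)

-- ===== PRECONDITION & SPEC =====
-- Pre_ excludes exactly the inputs where both Pythons raise IndexError: some '/'-terminated token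
-- of sequence occurs in codage at a first index ≥ len(alphabet). No other narrowing.
def Pre_decoder_2 (sequence : String) (alphabet : List String) (codage : List String) : Prop :=
  ((PySem.Chars.splitOn sequence.toList ['/']).dropLast.all (fun seg =>
     match PySem.List.index? codage (String.ofList (seg ++ ['/'])) with
     | some i => decide (i < alphabet.length)
     | none => true)) = true
instance (sequence : String) (alphabet : List String) (codage : List String) : Decidable (Pre_decoder_2 sequence alphabet codage) := by unfold Pre_decoder_2; infer_instance

def pvWitness_decoder_2 : String × List String × List String := ("..../.-/", ["H", "A"], ["..../", ".-/"])

def Spec_decoder_2 (sequence : String) (alphabet : List String) (codage : List String) (out : String) : Prop := out = decoder_2_alt sequence alphabet codage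
instance (sequence : String) (alphabet : List String) (codage : List String) (out : String) : Decidable (Spec_decoder_2 sequence alphabet codage out) := by unfold Spec_decoder_2; infer_instance

-- ===== CLAIM (what is proved, stated in full; the proofs are below) =====
def Claim_equal_decoder_2 : Prop := ∀ (sequence : String) (alphabet : List String) (codage : List String), Dom_decoder_2 sequence alphabet codage → Pre_decoder_2 sequence alphabet codage → Spec_decoder_2 sequence alphabet codage (decoder_2 sequence alphabet codage)

-- ===== LEMMAS AND PROOFS =====

-- A's per-token decode, the common value both loops compute for one token
def pvDecodeSeg (alphabet codage : List String) (seg : List Char) : List Char :=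
  match PySem.List.index? codage (String.ofList (seg ++ ['/'])) with
  | some i => (alphabet.getD i "").toList
  | none => ['_']

lemma pvSplit_ne_nil (cs : List Char) : pvSplit cs ≠ [] := by
  cases cs with
  | nil => simp [pvSplit]
  | cons c cs =>
    simp only [pvSplit]
    split
    · simp
    · split <;> simp

lemma pvSplit_no_slash (buf : List Char) (h : '/' ∉ buf) : pvSplit buf = [buf] := by
  induction buf with
  | nil => rfl
  | cons c cs ih =>
    have hc : c ≠ '/' := fun hc => h (hc ▸ List.mem_cons_self ..)
    have := ih (fun hm => h (List.mem_cons_of_mem _ hm))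
    simp [pvSplit, hc, this]

lemma pvSplit_append_slash (buf cs : List Char) (h : '/' ∉ buf) :
    pvSplit (buf ++ '/' :: cs) = buf :: pvSplit cs := by
  induction buf with
  | nil => simp [pvSplit]
  | cons c bs ih =>
    have hc : c ≠ '/' := fun hc => h (hc ▸ List.mem_cons_self ..)
    have := ih (fun hm => h (List.mem_cons_of_mem _ hm))
    simp [pvSplit, hc, this]

lemma pvLoopA_eq (alphabet codage : List String) (cs : List Char) :
    ∀ buf res, '/' ∉ buf →
    pvLoopA alphabet codage cs buf res
      = res ++ ((pvSplit (buf ++ cs)).dropLast.map (pvDecodeSeg alphabet codage)).flatten := by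
  induction cs with
  | nil =>
    intro buf res h
    simp [pvLoopA, pvSplit_no_slash buf h]
  | cons c cs ih =>
    intro buf res h
    by_cases hc : c = '/'
    · subst hc
      rw [pvLoopA, if_pos rfl, ih [] _ (by simp), pvSplit_append_slash buf cs h,
        List.dropLast_cons_of_ne_nil (pvSplit_ne_nil cs)]
      simp [pvDecodeSeg]
    · rw [pvLoopA, if_neg hc, ih (buf ++ [c]) res
        (by simp [List.mem_append, h]; exact fun hx => hc hx.symm)]
      simp

lemma pvTable_foldl (l : List String) (n : Int) (d : PySem.Dict String Int) (k : String) :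
    ((PySem.List.enumerate l n).foldl (fun d p => d.setdefault p.2 p.1) d).get? k
      = (d.get? k).or ((PySem.List.index? l k).map (fun j => (j : Int) + n)) := by
  induction l generalizing n d with
  | nil => simp [PySem.List.enumerate_nil]
  | cons x xs ih =>
    rw [PySem.List.enumerate_cons, List.foldl_cons, ih]
    by_cases hk : k = x
    · subst hk
      rw [PySem.Dict.get?_setdefault_self, PySem.List.index?_cons_self]
      cases d.get? k <;> simp
    · rw [PySem.Dict.get?_setdefault_of_ne _ _ hk,
        PySem.List.index?_cons_of_ne _ (fun hx => hk hx.symm)]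
      cases d.get? k <;> cases PySem.List.index? xs k <;> (simp; try ring)

lemma pvTable_get? (codage : List String) (k : String) :
    (pvTable codage).get? k = (PySem.List.index? codage k).map (fun j => (j : Int)) := by
  rw [pvTable, pvTable_foldl]
  cases PySem.List.index? codage k <;> simp

lemma pvDecodeSeg_eq (alphabet codage : List String) (seg : List Char) :
    (match (pvTable codage).get? (String.ofList (seg ++ ['/'])) with
      | some i => (PySem.List.pyGetD alphabet i "").toList
      | none => ['_'])
      = pvDecodeSeg alphabet codage seg := by
  rw [pvTable_get?, pvDecodeSeg]
  cases PySem.List.index? codage (String.ofList (seg ++ ['/'])) with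
  | none => rfl
  | some j => simp [PySem.List.pyGetD_natCast]

-- ===== VERDICT (by name: the statement is the Claim_ definition above) =====
theorem decoder_2_spec : Claim_equal_decoder_2 := by
  intro sequence alphabet codage _ _
  unfold Spec_decoder_2 decoder_2 decoder_2_alt
  have hf : (fun seg => match (pvTable codage).get? (String.ofList (seg ++ ['/'])) with
      | some i => (PySem.List.pyGetD alphabet i "").toList
      | none => ['_']) = pvDecodeSeg alphabet codage :=
    funext (pvDecodeSeg_eq alphabet codage)
  rw [pvLoopA_eq alphabet codage sequence.toList [] [] (by simp)]
  dsimp only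
  rw [hf]
  simp
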